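-- pv_equiv track=rewrite | github.com/jedick/microbial-pH-predictions | train_hyenadna_ph.py | split_sequences_into_sets
-- ===== SOURCE A (Python) =====
-- from typing import Dict, List, Optional, Tuple
--
-- def split_sequences_into_sets(
--     sequences: List[str],
--     max_length: int,
--     num_sets: int = 5,
-- ) -> List[List[str]]:
--     """
--     Split sequences into non-overlapping sets, each fitting within max_length.
--
--     Args:
--         sequences: List of DNA sequence strings
--         max_length: Maximum total length for each set (in characters, before tokenization)
--         num_sets: Number of non-overlapping sets to create
--
--     Returns:
--         List of num_sets lists of sequences, each fitting within max_length
--     """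
--     if not sequences:
--         # Return num_sets empty sets
--         return [[] for _ in range(num_sets)]
--
--     # Filter out empty sequences
--     valid_sequences = [seq for seq in sequences if seq and len(seq) > 0]
--
--     if not valid_sequences:
--         return [[] for _ in range(num_sets)]
--
--     # Create num_sets non-overlapping sets
--     sets = [[] for _ in range(num_sets)]
--     current_set_idx = 0
--     sequence_idx = 0
--
--     while sequence_idx < len(valid_sequences) and current_set_idx < num_sets:
--         current_set = sets[current_set_idx]
--         cumulative_length = sum(len(seq) for seq in current_set)
--
--         # Try to add sequences to current set
--         while sequence_idx < len(valid_sequences):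
--             seq = valid_sequences[sequence_idx]
--             seq_len = len(seq)
--             # Estimate tokens needed: seq_len characters + 1 SEP token (if not first sequence)
--             tokens_needed = seq_len + (1 if current_set else 0)
--
--             if cumulative_length + tokens_needed <= max_length:
--                 current_set.append(seq)
--                 cumulative_length += tokens_needed
--                 sequence_idx += 1
--             else:
--                 # This sequence would exceed max_length for current set
--                 # Move to next set
--                 break
--
--         # Move to next set (either we filled this one or can't add more)
--         current_set_idx += 1
--
--         # If all sequences processed, we're done
--         if sequence_idx >= len(valid_sequences):
--             break
--
--     return sets
-- ===== SOURCE B (Python) =====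
-- def split_sequences_into_sets(sequences, max_length, num_sets=5):
--     # Prefix-sum + binary-search reformulation: with Q[i] = sum(len+1) over the
--     # first i non-empty sequences, the greedy set starting at index a ends at the
--     # largest e with Q[e] <= max_length + Q[a] + 1 (Q is strictly increasing), so
--     # each cut point is found by binary search instead of item-by-item packing.
--     valid = [s for s in sequences if s]
--     q = [0]
--     for s in valid:
--         q.append(q[-1] + len(s) + 1)
--     n = len(valid)
--     sets = []
--     a = 0
--     for _ in range(num_sets):
--         bound = max_length + q[a] + 1
--         lo, hi = a, n
--         while lo < hi:
--             mid = (lo + hi + 1) // 2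
--             if q[mid] <= bound:
--                 lo = mid
--             else:
--                 hi = mid - 1
--         sets.append(valid[a:lo])
--         a = lo
--     return sets
-- ===== Notes on version B (the rewrite author's own statement) =====
-- stated objective: alternative
-- what changed: B replaces A's item-by-item greedy packing (nested while loops appending one sequence at a time with a running cumulative length) by a prefix-sum array Q[i]=sum(len+1) over the non-empty sequences and, for each set, a binary search for the largest cut point e with Q[e] <= max_length + Q[a] + 1; sets are then produced as slices valid[a:e].
import Mathlib
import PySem

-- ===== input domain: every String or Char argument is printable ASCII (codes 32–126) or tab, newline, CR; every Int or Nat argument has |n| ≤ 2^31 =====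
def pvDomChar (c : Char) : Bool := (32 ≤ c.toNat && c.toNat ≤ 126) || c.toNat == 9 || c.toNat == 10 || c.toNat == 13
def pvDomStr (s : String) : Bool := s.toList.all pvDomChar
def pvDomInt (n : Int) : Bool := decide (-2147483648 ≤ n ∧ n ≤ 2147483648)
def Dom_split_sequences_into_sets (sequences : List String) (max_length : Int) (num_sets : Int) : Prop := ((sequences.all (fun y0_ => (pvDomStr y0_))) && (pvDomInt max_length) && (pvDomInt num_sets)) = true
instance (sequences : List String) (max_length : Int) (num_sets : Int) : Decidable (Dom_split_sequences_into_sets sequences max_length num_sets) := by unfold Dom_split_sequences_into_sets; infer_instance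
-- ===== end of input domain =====

-- B replaces A's item-by-item greedy packing by prefix sums Q[i]=sum(len+1) and a
-- binary search per set for the cut point (alternative algorithm, same return value).

-- ===== PORT A =====
-- Inner while of A: try to append sequences to the current set; returns (set, leftover sequences).
def pvInnerA (maxL : Int) : List String → List String → Int → (List String × List String)
  | [], curSet, _ => (curSet, [])
  | seq :: rest, curSet, cum =>
    let tokens := (PySem.Str.len seq) + (if curSet ≠ [] then 1 else 0)
    if cum + tokens ≤ maxL then pvInnerA maxL rest (curSet ++ [seq]) (cum + tokens)
    else (curSet, seq :: rest)

-- Outer while of A over set indices; num_sets.toNat iterations = current_set_idx < num_sets.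
-- cumulative_length = sum(len(seq) for seq in current_set), and the current set is always fresh ([]).
def pvOuterA (maxL : Int) : Nat → List String → List (List String)
  | 0, _ => []
  | k+1, valid =>
    if valid = [] then List.replicate (k+1) []   -- loop guard fails; remaining sets stay empty
    else
      let r := pvInnerA maxL valid (([] : List String)) ((([] : List String)).map PySem.Str.len).sum
      r.1 :: pvOuterA maxL k r.2

def split_sequences_into_sets (sequences : List String) (max_length : Int) (num_sets : Int) : List (List String) :=
  -- [[] for _ in range(num_sets)] = List.replicate num_sets.toNat []
  if sequences = [] then List.replicate num_sets.toNat []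
  else
    let valid := sequences.filter (fun s => s ≠ "")
    if valid = [] then List.replicate num_sets.toNat []
    else pvOuterA max_length num_sets.toNat valid

-- ===== PORT B =====
-- q = [0]; for s in valid: q.append(q[-1] + len(s) + 1)   (running last element as accumulator)
def pvQfrom (q : Int) : List String → List Int
  | [] => [q]
  | s :: rest => q :: pvQfrom (q + PySem.Str.len s + 1) rest

-- while lo < hi: mid = (lo+hi+1)//2; if q[mid] <= bound: lo = mid else hi = mid-1
-- (q[mid] with 0 ≤ mid ≤ len q - 1 always in range, so getD is exact; the fuel
-- argument hi - lo only makes the loop structurally total — it never runs out,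
-- since hi - lo shrinks by at least 1 each iteration)
def pvBsearch (Q : List Int) (bound : Int) : Nat → Nat → Nat → Nat
  | 0, lo, _ => lo
  | fuel+1, lo, hi =>
    if lo < hi then
      let mid := (lo + hi + 1) / 2
      if Q.getD mid 0 ≤ bound then pvBsearch Q bound fuel mid hi
      else pvBsearch Q bound fuel lo (mid - 1)
    else lo

-- for _ in range(num_sets): bound = ...; binary search; sets.append(valid[a:lo]); a = lo
-- (valid[a:lo] with 0 ≤ a ≤ lo ≤ len valid equals drop/take: exact)
def pvOuterB (valid : List String) (Q : List Int) (maxL : Int) : Nat → Nat → List (List String)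
  | 0, _ => []
  | k+1, a =>
    let bound := maxL + Q.getD a 0 + 1
    let e := pvBsearch Q bound (valid.length - a) a valid.length
    (valid.drop a).take (e - a) :: pvOuterB valid Q maxL k e

def split_sequences_into_sets_alt (sequences : List String) (max_length : Int) (num_sets : Int) : List (List String) :=
  let valid := sequences.filter (fun s => s ≠ "")
  pvOuterB valid (pvQfrom 0 valid) max_length num_sets.toNat 0

-- ===== PRECONDITION & SPEC =====
def Spec_split_sequences_into_sets (sequences : List String) (max_length : Int) (num_sets : Int) (out : List (List String)) : Prop := out = split_sequences_into_sets_alt sequences max_length num_sets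
instance (sequences : List String) (max_length : Int) (num_sets : Int) (out : List (List String)) : Decidable (Spec_split_sequences_into_sets sequences max_length num_sets out) := by unfold Spec_split_sequences_into_sets; infer_instance

-- ===== CLAIM (what is proved, stated in full; the proofs are below) =====
def Claim_equal_split_sequences_into_sets : Prop := ∀ (sequences : List String) (max_length : Int) (num_sets : Int), Dom_split_sequences_into_sets sequences max_length num_sets → Spec_split_sequences_into_sets sequences max_length num_sets (split_sequences_into_sets sequences max_length num_sets)

-- ===== LEMMAS AND PROOFS =====
-- Qf valid i = mathematical value of q[i] (prefix sum of len+1)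
def Qf (valid : List String) (i : Nat) : Int := (((valid.take i).map (fun s => PySem.Str.len s + 1)).sum)

-- the end index A's greedy inner scan reaches, as a linear scan (proof device)
def gstop (valid : List String) (bound : Int) (j : Nat) : Nat :=
  if j < valid.length ∧ Qf valid (j+1) ≤ bound then gstop valid bound (j+1) else j
  termination_by valid.length - j
  decreasing_by omega

theorem Qf_succ (valid : List String) (j : Nat) (h : j < valid.length) :
    Qf valid (j+1) = Qf valid j + (PySem.Str.len valid[j] + 1) := by
  unfold Qf
  rw [List.take_add_one, List.getElem?_eq_getElem h, List.map_append, List.sum_append]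
  simp

theorem Qf_cons (s : String) (rest : List String) (m : Nat) :
    Qf (s :: rest) (m+1) = (PySem.Str.len s + 1) + Qf rest m := by
  simp [Qf, List.take_succ_cons]

theorem take_push (l : List String) (k : Nat) (h : k < l.length) :
    l.take k ++ [l[k]] = l.take (k+1) := by
  rw [List.take_add_one, List.getElem?_eq_getElem h]
  rfl

theorem gstop_at_end (valid : List String) (bound : Int) :
    gstop valid bound valid.length = valid.length := by
  rw [gstop]
  exact if_neg (by intro hc; exact absurd hc.1 (lt_irrefl _))

theorem len_nonneg (s : String) : 0 ≤ PySem.Str.len s := by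
  simp [PySem.Str.len]

theorem Qf_strict_mono (valid : List String) (i j : Nat) (hij : i < j) (hj : j ≤ valid.length) :
    Qf valid i < Qf valid j := by
  induction j with
  | zero => omega
  | succ m ih =>
    have hm : m < valid.length := by omega
    rw [Qf_succ valid m hm]
    have := len_nonneg valid[m]
    rcases Nat.lt_or_ge i m with h | h
    · have := ih h (by omega); omega
    · have : i = m := by omega
      subst this; omega

theorem pvQfrom_getD (valid : List String) : ∀ (q : Int) (i : Nat), i ≤ valid.length →
    (pvQfrom q valid).getD i 0 = q + Qf valid i := by
  induction valid with
  | nil =>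
    intro q i hi
    have hi0 : i = 0 := by simpa using hi
    subst hi0
    simp [pvQfrom, Qf]
  | cons s rest ih =>
    intro q i hi
    cases i with
    | zero => simp [pvQfrom, Qf]
    | succ m =>
      simp only [pvQfrom, List.getD_cons_succ]
      rw [ih (q + PySem.Str.len s + 1) m (by simpa using hi), Qf_cons]
      ring

-- the common characterisation of the cut point starting at a
def CutSpec (valid : List String) (bound : Int) (a r : Nat) : Prop :=
  a ≤ r ∧ r ≤ valid.length ∧ (a < r → Qf valid r ≤ bound) ∧
    (r < valid.length → bound < Qf valid (r+1))

theorem cutSpec_unique (valid : List String) (bound : Int) (a r1 r2 : Nat)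
    (h1 : CutSpec valid bound a r1) (h2 : CutSpec valid bound a r2) : r1 = r2 := by
  obtain ⟨a1, b1, c1, d1⟩ := h1
  obtain ⟨a2, b2, c2, d2⟩ := h2
  rcases Nat.lt_trichotomy r1 r2 with h | h | h
  · have hQ1 := d1 (by omega)
    have hQ2 := c2 (by omega)
    rcases Nat.lt_or_ge (r1+1) r2 with hlt | hge
    · have := Qf_strict_mono valid (r1+1) r2 hlt b2; omega
    · have : r1 + 1 = r2 := by omega
      subst this; omega
  · exact h
  · have hQ1 := d2 (by omega)
    have hQ2 := c1 (by omega)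
    rcases Nat.lt_or_ge (r2+1) r1 with hlt | hge
    · have := Qf_strict_mono valid (r2+1) r1 hlt b1; omega
    · have : r2 + 1 = r1 := by omega
      subst this; omega

-- gstop satisfies CutSpec relative to its start point, carrying the invariant
theorem gstop_cutSpec (valid : List String) (bound : Int) :
    ∀ fuel j a, valid.length - j ≤ fuel → a ≤ j → j ≤ valid.length →
    (a < j → Qf valid j ≤ bound) → CutSpec valid bound a (gstop valid bound j) := by
  intro fuel
  induction fuel with
  | zero =>
    intro j a hf haj hj hinv
    have hjn : j = valid.length := by omega
    subst hjn
    rw [gstop_at_end]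
    exact ⟨haj, le_refl _, hinv, fun h => absurd h (lt_irrefl _)⟩
  | succ m ih =>
    intro j a hf haj hj hinv
    rw [gstop]
    by_cases h : j < valid.length ∧ Qf valid (j+1) ≤ bound
    · rw [if_pos h]
      exact ih (j+1) a (by omega) (by omega) (by omega) (fun _ => h.2)
    · rw [if_neg h]
      refine ⟨haj, hj, hinv, ?_⟩
      intro hlt
      push_neg at h
      exact h hlt

theorem pvBsearch_cutSpec (valid : List String) (bound : Int) (a : Nat) (ha : a ≤ valid.length) :
    ∀ fuel lo hi, hi - lo ≤ fuel → a ≤ lo → lo ≤ hi → hi ≤ valid.length →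
    (a < lo → Qf valid lo ≤ bound) → (hi < valid.length → bound < Qf valid (hi+1)) →
    CutSpec valid bound a (pvBsearch (pvQfrom 0 valid) bound fuel lo hi) := by
  intro fuel
  induction fuel with
  | zero =>
    intro lo hi hf hal hlh hhn hinvl hinvh
    have : lo = hi := by omega
    subst this
    exact ⟨hal, hhn, hinvl, hinvh⟩
  | succ m ih =>
    intro lo hi hf hal hlh hhn hinvl hinvh
    rw [pvBsearch]
    by_cases hlt : lo < hi
    · rw [if_pos hlt]
      have hmid1 : lo < (lo + hi + 1) / 2 := by omega
      have hmid2 : (lo + hi + 1) / 2 ≤ hi := by omega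
      have hQ : (pvQfrom 0 valid).getD ((lo + hi + 1) / 2) 0 = Qf valid ((lo + hi + 1) / 2) := by
        rw [pvQfrom_getD valid 0 _ (by omega)]; ring
      by_cases hq : (pvQfrom 0 valid).getD ((lo + hi + 1) / 2) 0 ≤ bound
      · rw [if_pos hq]
        refine ih ((lo + hi + 1) / 2) hi (by omega) (by omega) (by omega) hhn ?_ hinvh
        intro _; rw [← hQ]; exact hq
      · rw [if_neg hq]
        refine ih lo ((lo + hi + 1) / 2 - 1) (by omega) hal (by omega) (by omega) hinvl ?_
        intro _
        have h2 : (lo + hi + 1) / 2 - 1 + 1 = (lo + hi + 1) / 2 := by omega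
        rw [h2, ← hQ]; omega
    · rw [if_neg hlt]
      have : lo = hi := by omega
      subst this
      exact ⟨hal, hhn, hinvl, hinvh⟩

-- A's inner scan, from state (j, cur = valid[a:j], cum), reaches gstop
theorem pvInnerA_eq_gstop (maxL : Int) (valid : List String) (a : Nat) :
    ∀ fuel j, valid.length - j ≤ fuel → a ≤ j → j ≤ valid.length →
    pvInnerA maxL (valid.drop j) ((valid.drop a).take (j - a))
        (if j = a then 0 else Qf valid j - Qf valid a - 1)
      = ((valid.drop a).take (gstop valid (maxL + Qf valid a + 1) j - a),
         valid.drop (gstop valid (maxL + Qf valid a + 1) j)) := by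
  intro fuel
  induction fuel with
  | zero =>
    intro j hf haj hj
    have hjn : j = valid.length := by omega
    subst hjn
    rw [gstop_at_end]
    simp [pvInnerA]
  | succ m ih =>
    intro j hf haj hj
    rcases Nat.lt_or_ge j valid.length with hjlt | hjge
    · rw [List.drop_eq_getElem_cons hjlt]
      rw [pvInnerA]
      have hcur : ((valid.drop a).take (j - a) ≠ []) ↔ a < j := by
        constructor
        · intro h; by_contra hc
          have : j = a := by omega
          subst this; simp at h
        · intro h
          apply List.ne_nil_of_length_pos
          rw [List.length_take]
          simp
          omega
      have hsum : (if j = a then (0:Int) else Qf valid j - Qf valid a - 1) +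
          ((PySem.Str.len valid[j]) + (if (valid.drop a).take (j - a) ≠ [] then 1 else 0))
          = Qf valid (j+1) - Qf valid a - 1 := by
        rw [Qf_succ valid j hjlt]
        by_cases hja : j = a
        · subst hja
          rw [if_pos rfl, if_neg (by rw [hcur]; omega)]
          ring
        · rw [if_neg hja, if_pos (by rw [hcur]; omega)]
          ring
      simp only [hsum]
      by_cases hcond : Qf valid (j+1) - Qf valid a - 1 ≤ maxL
      · rw [if_pos hcond]
        have hgs : gstop valid (maxL + Qf valid a + 1) j = gstop valid (maxL + Qf valid a + 1) (j+1) := by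
          rw [gstop, if_pos ⟨hjlt, by omega⟩]
        rw [hgs]
        have htake : (valid.drop a).take (j - a) ++ [valid[j]] = (valid.drop a).take (j + 1 - a) := by
          have hja : j - a < (valid.drop a).length := by simp; omega
          have hgd : (valid.drop a)[j - a] = valid[j] := by
            rw [List.getElem_drop]
            congr 1
            omega
          rw [← hgd, take_push _ _ hja]
          congr 1
          omega
        rw [htake]
        have hrec := ih (j+1) (by omega) (by omega) (by omega)
        rw [if_neg (by omega : ¬ (j + 1 = a))] at hrec
        exact hrec
      · rw [if_neg hcond]
        rw [gstop, if_neg (by push_neg; intro _; omega)]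
        rw [← List.drop_eq_getElem_cons hjlt]
    · have hjn : j = valid.length := by omega
      subst hjn
      rw [gstop_at_end]
      simp [pvInnerA]

theorem pvOuterA_nil (maxL : Int) (n : Nat) : pvOuterA maxL n [] = List.replicate n [] := by
  cases n <;> simp [pvOuterA]

theorem pvOuterB_succ (valid : List String) (Q : List Int) (maxL : Int) (k a : Nat) :
    pvOuterB valid Q maxL (k+1) a =
      (valid.drop a).take (pvBsearch Q (maxL + Q.getD a 0 + 1) (valid.length - a) a valid.length - a) ::
        pvOuterB valid Q maxL k (pvBsearch Q (maxL + Q.getD a 0 + 1) (valid.length - a) a valid.length) := rfl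

-- main bridge: A's outer loop over the suffix from a = B's loop with cut index a
theorem outer_eq (maxL : Int) (valid : List String) :
    ∀ k a, a ≤ valid.length →
    pvOuterA maxL k (valid.drop a) = pvOuterB valid (pvQfrom 0 valid) maxL k a := by
  intro k
  induction k with
  | zero => intro a _; rfl
  | succ m ih =>
    intro a ha
    have hQa : (pvQfrom 0 valid).getD a 0 = Qf valid a := by
      rw [pvQfrom_getD valid 0 a ha]; ring
    set bound := maxL + Qf valid a + 1 with hb
    have hbs : pvBsearch (pvQfrom 0 valid) (maxL + (pvQfrom 0 valid).getD a 0 + 1)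
          (valid.length - a) a valid.length
        = gstop valid bound a := by
      rw [hQa]
      apply cutSpec_unique valid bound a
      · exact pvBsearch_cutSpec valid bound a ha _ a valid.length (le_refl _) (le_refl _) ha
          (le_refl _) (by omega) (by omega)
      · exact gstop_cutSpec valid bound _ a a (le_refl _) (le_refl _) ha (by omega)
    have hspec := gstop_cutSpec valid bound (valid.length - a) a a (le_refl _) (le_refl _) ha (by omega)
    obtain ⟨hae, hen, _, _⟩ := hspec
    set e := gstop valid bound a with he
    have hinner := pvInnerA_eq_gstop maxL valid a (valid.length - a) a (le_refl _) (le_refl _) ha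
    rw [if_pos rfl] at hinner
    simp only [Nat.sub_self, List.take_zero] at hinner
    rw [pvOuterB_succ, hbs]
    rcases Nat.lt_or_ge a valid.length with halt | hage
    · have hne : valid.drop a ≠ [] := by
        apply List.ne_nil_of_length_pos; simp; omega
      rw [pvOuterA, if_neg hne]
      simp only [List.map_nil, List.sum_nil]
      rw [hinner]
      exact congrArg _ (ih e hen)
    · have ha' : a = valid.length := by omega
      have hea : e = a := by rw [he, ha', gstop_at_end]
      have hnil : valid.drop a = [] := List.drop_eq_nil_of_le hage
      rw [hea, hnil, pvOuterA_nil, ← ih a ha, hnil, pvOuterA_nil]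
      simp [List.replicate_succ]

-- ===== VERDICT (by name: the statement is the Claim_ definition above) =====
theorem split_sequences_into_sets_spec : Claim_equal_split_sequences_into_sets := by
  intro sequences max_length num_sets _
  unfold Spec_split_sequences_into_sets split_sequences_into_sets split_sequences_into_sets_alt
  have h := outer_eq max_length (sequences.filter (fun s => s ≠ "")) num_sets.toNat 0 (Nat.zero_le _)
  rw [List.drop_zero] at h
  by_cases h1 : sequences = []
  · subst h1
    simp only [List.filter_nil] at h ⊢
    rw [if_pos trivial, ← h, pvOuterA_nil]
  · rw [if_neg h1]
    by_cases h2 : sequences.filter (fun s => s ≠ "") = []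
    · rw [if_pos h2, ← h, h2, pvOuterA_nil]
    · rw [if_neg h2]
      exact h
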